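-- pv_equiv track=rewrite | github.com/vwefnab/analyze-cowrie-log | analyze_cowrie.py | delete_enter_str
-- ===== SOURCE A (Python) =====
-- def delete_enter_str(new_command_list):
--     new_command_list2 = list()
--     for cmd_list in new_command_list:
--         count = 0
--         index_list = list()
--         temp_command_list = list()
--         text_string = ''
--         while count < len(cmd_list):
--             if '#ENTER#' in cmd_list[count]:
--                 temp_command_list.append(text_string)
--                 text_string = ''
--             else:
--                 text_string += ' ' + str(cmd_list[count])
--             count += 1
--         new_command_list2.append(temp_command_list)
--
--     return new_command_list2
-- ===== SOURCE B (Python) =====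
-- def delete_enter_str(new_command_list):
--     return [_segments(cmd_list) for cmd_list in new_command_list]
--
--
-- def _segments(cmd_list):
--     marks = [i for i, x in enumerate(cmd_list) if '#ENTER#' in x]
--     segs = []
--     start = 0
--     for pos in marks:
--         segs.append(''.join(' ' + x for x in cmd_list[start:pos]))
--         start = pos + 1
--     return segs
-- ===== Notes on version B (the rewrite author's own statement) =====
-- stated objective: alternative
-- what changed: Instead of A's index-driven while loop that grows a text accumulator string via repeated '+=' and resets it at each marker, B first collects the marker positions, then slices the list between consecutive markers and renders each slice with a single join; the trailing post-last-marker text is never built at all.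
import Mathlib
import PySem

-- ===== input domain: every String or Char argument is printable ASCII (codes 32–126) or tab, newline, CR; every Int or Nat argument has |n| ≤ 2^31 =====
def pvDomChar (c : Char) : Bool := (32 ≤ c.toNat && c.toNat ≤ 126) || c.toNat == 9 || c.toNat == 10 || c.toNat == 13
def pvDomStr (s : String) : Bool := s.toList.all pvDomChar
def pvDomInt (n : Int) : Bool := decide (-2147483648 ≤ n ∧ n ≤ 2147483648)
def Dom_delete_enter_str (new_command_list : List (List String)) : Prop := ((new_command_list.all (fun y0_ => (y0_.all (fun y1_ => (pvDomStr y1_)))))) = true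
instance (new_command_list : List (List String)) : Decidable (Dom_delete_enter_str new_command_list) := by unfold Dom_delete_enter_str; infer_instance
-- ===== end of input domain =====

-- B replaces A's index-driven accumulator loop by collecting marker positions first and
-- slicing/joining the list between consecutive markers (objective: alternative decomposition).


-- ===== PORT A =====
-- the while loop walks cmd_list by index 0,1,…; ported as a foldl over the elements with the
-- same state (temp_command_list, text_string)
def pvSegA (cmd_list : List String) : List String :=
  (cmd_list.foldl
    (fun (s : List String × String) c =>
      if PySem.Str.isIn "#ENTER#" c then (s.1 ++ [s.2], "") else (s.1, s.2 ++ (" " ++ c)))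
    ([], "")).1

def delete_enter_str (new_command_list : List (List String)) : List (List String) :=
  new_command_list.foldl (fun acc cmd_list => acc ++ [pvSegA cmd_list]) []

-- ===== PORT B =====
-- ''.join(' ' + x for x in seg)
def pvJoin (seg : List String) : String :=
  PySem.Str.join "" (seg.map (fun x => " " ++ x))

-- marks = [i for i, x in enumerate(cmd_list) if '#ENTER#' in x]; then fold over marks with a
-- start cursor, slicing cmd_list[start:pos]
def pvSegB (cmd_list : List String) : List String :=
  ((((PySem.List.enumerate cmd_list 0).filter
        (fun q => PySem.Str.isIn "#ENTER#" q.2)).map (·.1)).foldl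
    (fun (s : List String × Int) pos =>
      (s.1 ++ [pvJoin (PySem.List.slice cmd_list (some s.2) (some pos))], pos + 1))
    ([], 0)).1

def delete_enter_str_alt (new_command_list : List (List String)) : List (List String) :=
  new_command_list.map pvSegB

-- ===== PRECONDITION & SPEC =====
def Spec_delete_enter_str (new_command_list : List (List String)) (out : List (List String)) : Prop := out = delete_enter_str_alt new_command_list
instance (new_command_list : List (List String)) (out : List (List String)) : Decidable (Spec_delete_enter_str new_command_list out) := by unfold Spec_delete_enter_str; infer_instance

-- ===== CLAIM (what is proved, stated in full; the proofs are below) =====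
def Claim_equal_delete_enter_str : Prop := ∀ (new_command_list : List (List String)), Dom_delete_enter_str new_command_list → Spec_delete_enter_str new_command_list (delete_enter_str new_command_list)

-- ===== LEMMAS AND PROOFS =====

-- reference splitter: current segment carried as the list of words seen since the last marker
def pvRef (mid : List String) : List String → List String
  | [] => []
  | c :: cs =>
      if PySem.Str.isIn "#ENTER#" c then pvJoin mid :: pvRef [] cs
      else pvRef (mid ++ [c]) cs

theorem pvJoin_nil : pvJoin [] = "" := rfl

theorem pvIntercalate_nil {α : Type} (l : List (List α)) :
    List.intercalate [] l = l.flatten := by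
  induction l with
  | nil => simp [List.intercalate]
  | cons a as ih => cases as <;> simp_all [List.intercalate, List.intersperse]

theorem pvJoin_toList (seg : List String) :
    (pvJoin seg).toList = (seg.map (fun x => ' ' :: x.toList)).flatten := by
  simp only [pvJoin, PySem.Str.toList_join, PySem.Chars.join]
  rw [show "".toList = ([] : List Char) from rfl, pvIntercalate_nil, List.map_map]
  congr 1
  refine List.map_congr_left fun x _ => ?_
  simp

theorem pvJoin_append_singleton (mid : List String) (c : String) :
    pvJoin (mid ++ [c]) = pvJoin mid ++ (" " ++ c) := by
  apply String.toList_inj.mp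
  simp [pvJoin_toList]

-- A's fold equals the reference splitter
theorem pvSegA_eq_ref (l : List String) (acc : List String) (mid : List String) :
    (l.foldl
      (fun (s : List String × String) c =>
        if PySem.Str.isIn "#ENTER#" c then (s.1 ++ [s.2], "") else (s.1, s.2 ++ (" " ++ c)))
      (acc, pvJoin mid)).1 = acc ++ pvRef mid l := by
  induction l generalizing acc mid with
  | nil => simp [pvRef]
  | cons c cs ih =>
      simp only [List.foldl_cons, pvRef]
      by_cases h : PySem.Str.isIn "#ENTER#" c
      · simp only [h, if_true]
        have := ih (acc ++ [pvJoin mid]) []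
        simpa [pvJoin_nil] using this
      · simp only [h]
        rw [← pvJoin_append_singleton]
        simpa using ih acc (mid ++ [c])

-- B's marks-and-slices fold equals the reference splitter
theorem pvSegB_eq_ref (full : List String) :
    ∀ (rest : List String) (s start : Nat) (acc : List String),
      full.drop s = rest → start ≤ s →
      ((((PySem.List.enumerate rest (s : Int)).filter
            (fun q => PySem.Str.isIn "#ENTER#" q.2)).map (·.1)).foldl
        (fun (st : List String × Int) pos =>
          (st.1 ++ [pvJoin (PySem.List.slice full (some st.2) (some pos))], pos + 1))
        (acc, (start : Int))).1
      = acc ++ pvRef ((full.drop start).take (s - start)) rest := by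
  intro rest
  induction rest with
  | nil => intro s start acc _ _; simp [PySem.List.enumerate, pvRef]
  | cons c cs ih =>
      intro s start acc hdrop hle
      rw [PySem.List.enumerate_cons]
      by_cases h : PySem.Str.isIn "#ENTER#" c
      · simp only [List.filter_cons, h, if_true, List.map_cons, List.foldl_cons]
        have hdrop' : full.drop (s + 1) = cs := by
          rw [← List.drop_drop]
          simp [hdrop]
        have hcast : (s : Int) + 1 = ((s + 1 : Nat) : Int) := by push_cast; ring
        rw [PySem.List.slice_natCast, hcast, ih (s + 1) (s + 1) _ hdrop' le_rfl]
        simp only [Nat.sub_self, List.take_zero, pvRef]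
        rw [if_pos h]
        simp
      · simp only [List.filter_cons, h, Bool.false_eq_true, if_false]
        have hdrop' : full.drop (s + 1) = cs := by
          rw [← List.drop_drop]
          simp [hdrop]
        rw [show ((s : Int) + 1) = ((s + 1 : Nat) : Int) by push_cast; ring,
            ih (s + 1) start acc hdrop' (Nat.le_succ_of_le hle)]
        have hmid : (full.drop start).take (s + 1 - start)
            = (full.drop start).take (s - start) ++ [c] := by
          have hstep : s + 1 - start = (s - start) + 1 := by omega
          have h0 : full[s]? = some c := by
            have := congrArg (fun t => t[0]?) hdrop
            simpa [List.getElem?_drop] using this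
          have hget : (full.drop start)[s - start]? = some c := by
            rw [List.getElem?_drop, show start + (s - start) = s by omega, h0]
          rw [hstep, List.take_add_one, hget]
          rfl
        rw [hmid]
        simp only [pvRef]
        rw [if_neg (by revert h; simp)]

theorem pvSegB_eq_pvSegA (l : List String) : pvSegB l = pvSegA l := by
  have hB := pvSegB_eq_ref l l 0 0 [] rfl le_rfl
  have hA := pvSegA_eq_ref l [] []
  simp only [Nat.cast_zero, List.drop_zero, Nat.sub_self, List.take_zero,
    List.nil_append] at hB hA
  unfold pvSegB pvSegA
  exact hB.trans hA.symm

-- ===== VERDICT (by name: the statement is the Claim_ definition above) =====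
theorem delete_enter_str_spec : Claim_equal_delete_enter_str := by
  intro ncl _
  unfold Spec_delete_enter_str delete_enter_str delete_enter_str_alt
  rw [PySem.List.foldl_append_singleton_eq_map]
  exact List.map_congr_left (fun l _ => (pvSegB_eq_pvSegA l).symm)
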